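-- pv_equiv track=rewrite | github.com/ashim-mahara/ART | dev/pipeline-rl/run_2048_async.py | condense_sequence
-- ===== SOURCE A (Python) =====
-- def condense_sequence(sequence: list[int | None]) -> list[int | None]:
--     """Condense, privileging matches at the start of the sequence"""
--     condensed_sequence = []
--     gapless_sequence = [cell for cell in sequence if cell is not None]
--
--     i = 0
--     while i < len(gapless_sequence):
--         if (
--             i + 1 < len(gapless_sequence)
--             and gapless_sequence[i] == gapless_sequence[i + 1]
--         ):
--             condensed_sequence.append(gapless_sequence[i] * 2)
--             i += 2
--         else:
--             condensed_sequence.append(gapless_sequence[i])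
--             i += 1
--
--     # pad the sequence with None at the end
--     return condensed_sequence + [None] * (4 - len(condensed_sequence))
-- ===== SOURCE B (Python) =====
-- def condense_sequence(sequence: list[int | None]) -> list[int | None]:
--     """Condense, privileging matches at the start of the sequence"""
--     result = []
--     just_merged = False
--     for cell in sequence:
--         if cell is None:
--             continue
--         if result and not just_merged and result[-1] == cell:
--             result[-1] *= 2
--             just_merged = True
--         else:
--             result.append(cell)
--             just_merged = False
--     return result + [None] * (4 - len(result))
-- ===== Notes on version B (the rewrite author's own statement) =====
-- stated objective: alternative
-- what changed: Replaced A's two-phase strip-then-index-jumping lookahead while-loop with one forward pass over the original cells that skips None inline and maintains a just_merged flag to merge each cell into the last result entry at most once.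
import Mathlib
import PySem

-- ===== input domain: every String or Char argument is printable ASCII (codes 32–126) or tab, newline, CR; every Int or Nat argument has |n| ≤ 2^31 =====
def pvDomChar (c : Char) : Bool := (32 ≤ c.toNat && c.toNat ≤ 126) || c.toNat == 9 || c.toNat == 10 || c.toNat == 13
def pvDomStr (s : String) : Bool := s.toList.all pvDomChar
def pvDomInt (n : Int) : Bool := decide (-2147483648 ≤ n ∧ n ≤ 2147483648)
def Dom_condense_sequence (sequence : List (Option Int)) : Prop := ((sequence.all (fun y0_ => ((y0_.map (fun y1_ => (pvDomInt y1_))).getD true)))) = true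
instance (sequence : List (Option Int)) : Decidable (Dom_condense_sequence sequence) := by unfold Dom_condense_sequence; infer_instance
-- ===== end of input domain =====

-- B replaces A's strip-then-lookahead while-loop by a single forward pass with a
-- just_merged flag (alternative decomposition, same cost); return value only.

-- ===== PORT A =====
-- the while-loop over gapless_sequence with lookahead and i += 2 / i += 1,
-- as the corresponding structural recursion consuming two or one elements
def condLoopA : List Int → List Int
  | [] => []
  | [x] => [x]
  | x :: y :: rest =>
    if x = y then x * 2 :: condLoopA rest
    else x :: condLoopA (y :: rest)

def condense_sequence (sequence : List (Option Int)) : List (Option Int) :=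
  let gapless := sequence.filterMap id
  let condensed := condLoopA gapless
  condensed.map some ++ List.replicate (4 - condensed.length) none

-- ===== PORT B =====
-- one step of B's for-loop body on a non-None cell: state = (result, just_merged)
def bStep (st : List Int × Bool) (c : Int) : List Int × Bool :=
  if st.1 ≠ [] ∧ st.2 = false ∧ st.1.getLast? = some c then
    (st.1.dropLast ++ [c * 2], true)
  else
    (st.1 ++ [c], false)

-- B's for-loop body, including the 'if cell is None: continue'
def altStep (st : List Int × Bool) (cell : Option Int) : List Int × Bool :=
  match cell with
  | none => st
  | some c => bStep st c

def condense_sequence_alt (sequence : List (Option Int)) : List (Option Int) :=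
  let st := sequence.foldl altStep ([], false)
  st.1.map some ++ List.replicate (4 - st.1.length) none

-- ===== PRECONDITION & SPEC =====
def Spec_condense_sequence (sequence : List (Option Int)) (out : List (Option Int)) : Prop := out = condense_sequence_alt sequence
instance (sequence : List (Option Int)) (out : List (Option Int)) : Decidable (Spec_condense_sequence sequence out) := by unfold Spec_condense_sequence; infer_instance

-- ===== CLAIM (what is proved, stated in full; the proofs are below) =====
def Claim_equal_condense_sequence : Prop := ∀ (sequence : List (Option Int)), Dom_condense_sequence sequence → Spec_condense_sequence sequence (condense_sequence sequence)

-- ===== LEMMAS AND PROOFS =====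

-- folding B's step over the Option list is folding bStep over the gapless list
theorem foldl_altStep_filterMap (sequence : List (Option Int)) (st : List Int × Bool) :
    sequence.foldl altStep st = (sequence.filterMap id).foldl bStep st := by
  induction sequence generalizing st with
  | nil => rfl
  | cons c cs ih =>
    cases c with
    | none => simpa [altStep, List.filterMap] using ih st
    | some v => simpa [altStep, List.filterMap] using ih (bStep st v)

-- the loop invariant of B's pass: with just_merged set the rest is condensed
-- fresh; with just_merged clear the last appended value a may still merge
theorem bStep_invariant (l : List Int) :
    (∀ acc : List Int, (l.foldl bStep (acc, true)).1 = acc ++ condLoopA l) ∧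
    (∀ (acc : List Int) (a : Int),
      (l.foldl bStep (acc ++ [a], false)).1 = acc ++ condLoopA (a :: l)) := by
  induction l with
  | nil => exact ⟨fun acc => by simp [condLoopA], fun acc a => by simp [condLoopA]⟩
  | cons c cs ih =>
    constructor
    · intro acc
      have h : bStep (acc, true) c = (acc ++ [c], false) := by
        simp [bStep]
      rw [List.foldl_cons, h, ih.2 acc c]
    · intro acc a
      by_cases hac : a = c
      · subst hac
        have h : bStep (acc ++ [a], false) a = (acc ++ [a * 2], true) := by
          simp [bStep]
        rw [List.foldl_cons, h, ih.1 (acc ++ [a * 2])]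
        simp [condLoopA]
      · have h : bStep (acc ++ [a], false) c = (acc ++ [a] ++ [c], false) := by
          simp [bStep, hac]
        rw [List.foldl_cons, h, ih.2 (acc ++ [a]) c]
        simp [condLoopA, hac]

theorem foldl_bStep_eq_condLoopA (l : List Int) :
    (l.foldl bStep ([], false)).1 = condLoopA l := by
  cases l with
  | nil => rfl
  | cons c cs =>
    have h : bStep ([], false) c = ([c], false) := by simp [bStep]
    have := (bStep_invariant cs).2 [] c
    simpa [h] using this

-- ===== VERDICT (by name: the statement is the Claim_ definition above) =====
theorem condense_sequence_spec : Claim_equal_condense_sequence := by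
  intro sequence _
  unfold Spec_condense_sequence condense_sequence condense_sequence_alt
  rw [foldl_altStep_filterMap]
  simp only [foldl_bStep_eq_condLoopA]
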